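-- pv_equiv track=rewrite | github.com/HijackedSlang/AlgoritmoHeuristicoHorariosTesis | Data_Gen_G-Copy1.py | check_parity_v3
-- ===== SOURCE A (Python) =====
-- def check_parity_v3(vector):
--     parejas_malas = []
--     first_appearance = {}
--
--     for i, group in enumerate(vector):
--         for j, pair in enumerate(group):
--             if pair[1] != 0:
--                 if pair[1] not in first_appearance:
--                     first_appearance[pair[1]] = (i, j)
--                 else:
--                     if (i % 2) == (first_appearance[pair[1]][0] % 2) and abs(j - first_appearance[pair[1]][1]) == 0:
--                         parejas_malas.append([i, j, pair[1]])
--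
--     return parejas_malas
-- ===== SOURCE B (Python) =====
-- def check_parity_v3(vector):
--     # Phase 1: flatten the matrix into (value, i, j) triples for non-zero values.
--     flat = [(pair[1], i, j)
--             for i, group in enumerate(vector)
--             for j, pair in enumerate(group)
--             if pair[1] != 0]
--     # Phase 2: sort so equal values form contiguous runs; within a run the
--     # (i, j) order is traversal order, so each run's head is the value's
--     # first traversal occurrence.
--     flat.sort()
--     # Phase 3: one scan over the runs; the run head is the anchor.
--     bad = []
--     anchor = None
--     for v, i, j in flat:
--         if anchor is None or anchor[0] != v:
--             anchor = (v, i, j)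
--         elif i % 2 == anchor[1] % 2 and j == anchor[2]:
--             bad.append((i, j, v))
--     # Phase 4: positions are distinct, so sorting by (i, j) restores the
--     # traversal (emission) order of the matches.
--     bad.sort()
--     return [[i, j, v] for (i, j, v) in bad]
-- ===== Notes on version B (the rewrite author's own statement) =====
-- stated objective: alternative
-- what changed: B replaces A's single stateful scan with a first-appearance dict by a sort-based group-by: it flattens to (value,i,j) triples, sorts so equal values form runs whose head is the first traversal occurrence, scans each run against its head, and finally re-sorts the matches by (i,j) to restore traversal order.
import Mathlib
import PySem

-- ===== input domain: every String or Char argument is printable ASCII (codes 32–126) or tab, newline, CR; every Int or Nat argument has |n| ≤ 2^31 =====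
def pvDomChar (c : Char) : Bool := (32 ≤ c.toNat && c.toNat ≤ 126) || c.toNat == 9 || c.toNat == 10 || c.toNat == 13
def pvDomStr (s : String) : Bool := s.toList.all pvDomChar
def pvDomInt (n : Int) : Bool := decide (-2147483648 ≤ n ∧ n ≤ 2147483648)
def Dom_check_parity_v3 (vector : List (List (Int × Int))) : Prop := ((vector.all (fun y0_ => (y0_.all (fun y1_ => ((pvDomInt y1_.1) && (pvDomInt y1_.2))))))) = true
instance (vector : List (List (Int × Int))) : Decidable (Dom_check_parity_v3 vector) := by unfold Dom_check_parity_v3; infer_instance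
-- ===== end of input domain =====

-- B is a sort-based group-by: flatten to (value, i, j) triples, sort so equal values
-- form runs whose head is the value's first traversal occurrence, scan each run
-- against its head, then re-sort the matches by (i, j) — instead of A's single
-- stateful scan with an incrementally built first-appearance dict (objective: alternative).

-- ===== PORT A =====
def check_parity_v3 (vector : List (List (Int × Int))) : List (List Int) :=
  let st :=
    (PySem.List.enumerate vector).foldl (fun st ig =>
      (PySem.List.enumerate ig.2).foldl (fun st jp =>
        if jp.2.2 ≠ 0 then
          match st.2.get? jp.2.2 with
          | none => (st.1, st.2.insert jp.2.2 (ig.1, jp.1))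
          | some fp =>
            if PySem.Int.mod ig.1 2 = PySem.Int.mod fp.1 2 ∧ |jp.1 - fp.2| = 0 then
              (st.1 ++ [[ig.1, jp.1, jp.2.2]], st.2)
            else st
        else st) st)
      (([] : List (List Int)), (PySem.Dict.empty : PySem.Dict Int (Int × Int)))
  st.1

-- ===== PORT B =====
-- Python's tuple comparison on (v, i, j) is the lexicographic order; pvKey3 is that
-- order as a sort key (exact for 3-tuples of ints).
def pvKey3 (t : Int × Int × Int) : Lex (Int × Lex (Int × Int)) := toLex (t.1, toLex (t.2.1, t.2.2))

def check_parity_v3_alt (vector : List (List (Int × Int))) : List (List Int) :=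
  let flat : List (Int × Int × Int) :=
    (PySem.List.enumerate vector).flatMap (fun ig =>
      (PySem.List.enumerate ig.2).filterMap (fun jp =>
        if jp.2.2 ≠ 0 then some (jp.2.2, ig.1, jp.1) else none))
  let sflat := PySem.List.sorted flat pvKey3 false
  let bad := (sflat.foldl (fun st t =>
      match st.2 with
      | none => (st.1, some t)
      | some a =>
        if a.1 ≠ t.1 then (st.1, some t)
        else if PySem.Int.mod t.2.1 2 = PySem.Int.mod a.2.1 2 ∧ t.2.2 = a.2.2 then
          (st.1 ++ [(t.2.1, t.2.2, t.1)], st.2)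
        else st)
    (([] : List (Int × Int × Int)), (none : Option (Int × Int × Int)))).1
  (PySem.List.sorted bad pvKey3 false).map (fun t => [t.1, t.2.1, t.2.2])

-- ===== PRECONDITION & SPEC =====
def Spec_check_parity_v3 (vector : List (List (Int × Int))) (out : List (List Int)) : Prop := out = check_parity_v3_alt vector
instance (vector : List (List (Int × Int))) (out : List (List Int)) : Decidable (Spec_check_parity_v3 vector out) := by unfold Spec_check_parity_v3; infer_instance

-- ===== CLAIM (what is proved, stated in full; the proofs are below) =====
def Claim_equal_check_parity_v3 : Prop := ∀ (vector : List (List (Int × Int))), Dom_check_parity_v3 vector → Spec_check_parity_v3 vector (check_parity_v3 vector)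

-- ===== LEMMAS AND PROOFS =====

-- the flattened list of (i, j, value) triples, nonzero-valued positions in traversal order
def pvFlat (vector : List (List (Int × Int))) : List (Int × Int × Int) :=
  (PySem.List.enumerate vector).flatMap (fun ig =>
    (PySem.List.enumerate ig.2).filterMap (fun jp =>
      if jp.2.2 ≠ 0 then some (ig.1, jp.1, jp.2.2) else none))

-- (i, j, v) → (v, i, j), the triple shape B's phase 1 builds
def pvSw (t : Int × Int × Int) : Int × Int × Int := (t.2.2, t.1, t.2.1)

-- strict traversal order on (i, j, v) triples: lexicographic in the position (i, j)
def pvPosLt (a b : Int × Int × Int) : Prop := a.1 < b.1 ∨ (a.1 = b.1 ∧ a.2.1 < b.2.1)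

-- A's loop body seen as one step over a flat triple
def pvStepA (st : List (List Int) × PySem.Dict Int (Int × Int)) (t : Int × Int × Int) :
    List (List Int) × PySem.Dict Int (Int × Int) :=
  match st.2.get? t.2.2 with
  | none => (st.1, st.2.insert t.2.2 (t.1, t.2.1))
  | some fp =>
    if PySem.Int.mod t.1 2 = PySem.Int.mod fp.1 2 ∧ |t.2.1 - fp.2| = 0 then
      (st.1 ++ [[t.1, t.2.1, t.2.2]], st.2)
    else st

-- reference: what A emits at one triple, given the already-seen prefix
def pvEmit (pre : List (Int × Int × Int)) (t : Int × Int × Int) : List (List Int) :=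
  match pre.find? (fun u => u.2.2 == t.2.2) with
  | none => []
  | some fp =>
    if PySem.Int.mod t.1 2 = PySem.Int.mod fp.1 2 ∧ |t.2.1 - fp.2.1| = 0 then
      [[t.1, t.2.1, t.2.2]]
    else []

def pvGo (pre l : List (Int × Int × Int)) : List (List Int) :=
  match l with
  | [] => []
  | t :: r => pvEmit pre t ++ pvGo (pre ++ [t]) r

-- the matching predicate, phrased against the whole flat list: t matches iff the
-- first triple of its value is at another position with equal row parity and column
def pvQ (flat : List (Int × Int × Int)) (t : Int × Int × Int) : Bool :=
  match flat.find? (fun u => u.2.2 == t.2.2) with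
  | some f => decide ((f.1, f.2.1) ≠ (t.1, t.2.1) ∧ PySem.Int.mod f.1 2 = PySem.Int.mod t.1 2 ∧ f.2.1 = t.2.1)
  | none => false

-- B's phase-3 loop, recursively, emitting in scan order ((v,i,j) triples in, (i,j,v) out)
def pvLoop (a : Option (Int × Int × Int)) (s : List (Int × Int × Int)) : List (Int × Int × Int) :=
  match s with
  | [] => []
  | t :: r =>
    match a with
    | none => pvLoop (some t) r
    | some a₀ =>
      if a₀.1 ≠ t.1 then pvLoop (some t) r
      else if PySem.Int.mod t.2.1 2 = PySem.Int.mod a₀.2.1 2 ∧ t.2.2 = a₀.2.2 then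
        (t.2.1, t.2.2, t.1) :: pvLoop a r
      else pvLoop a r

-- what B's loop emits per element of s, given the find?-anchor of the whole s
def pvG (s : List (Int × Int × Int)) (t : Int × Int × Int) : Option (Int × Int × Int) :=
  match s.find? (fun u => u.1 == t.1) with
  | some f =>
    if f ≠ t ∧ PySem.Int.mod t.2.1 2 = PySem.Int.mod f.2.1 2 ∧ t.2.2 = f.2.2 then
      some (t.2.1, t.2.2, t.1)
    else none
  | none => none

lemma pvFlat_pairwise (vector : List (List (Int × Int))) : (pvFlat vector).Pairwise pvPosLt := by
  unfold pvFlat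
  rw [List.pairwise_flatMap]
  constructor
  · intro ig _
    rw [List.pairwise_filterMap]
    refine (PySem.List.pairwise_lt_enumerate ig.2 0).imp ?_
    intro p q hlt b hb b' hb'
    split at hb
    case isTrue =>
      split at hb'
      case isTrue =>
        cases hb; cases hb'
        simp [pvPosLt]
        omega
      case isFalse => cases hb'
    case isFalse => cases hb
  · refine (PySem.List.pairwise_lt_enumerate vector 0).imp ?_
    intro p q hlt x hx y hy
    rcases List.mem_filterMap.mp hx with ⟨jp, _, hjp⟩
    rcases List.mem_filterMap.mp hy with ⟨jq, _, hjq⟩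
    split at hjp
    case isFalse => cases hjp
    case isTrue =>
      split at hjq
      case isFalse => cases hjq
      case isTrue =>
        cases hjp; cases hjq
        simp [pvPosLt]
        omega

lemma pvFoldA (l : List (Int × Int × Int)) :
    ∀ (pre : List (Int × Int × Int)) (acc : List (List Int)) (d : PySem.Dict Int (Int × Int)),
    (∀ v : Int, d.get? v = (pre.find? (fun u => u.2.2 == v)).map (fun u => (u.1, u.2.1))) →
    (l.foldl pvStepA (acc, d)).1 = acc ++ pvGo pre l := by
  induction l with
  | nil => intro pre acc d _; simp [pvGo]
  | cons t r ih =>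
    intro pre acc d hrep
    have hd := hrep t.2.2
    cases hfind : pre.find? (fun u => u.2.2 == t.2.2) with
    | none =>
      rw [hfind] at hd
      have hstep : pvStepA (acc, d) t = (acc, d.insert t.2.2 (t.1, t.2.1)) := by
        simp [pvStepA, hd]
      have hrep' : ∀ v : Int, (d.insert t.2.2 (t.1, t.2.1)).get? v
          = ((pre ++ [t]).find? (fun u => u.2.2 == v)).map (fun u => (u.1, u.2.1)) := by
        intro v
        by_cases hv : v = t.2.2
        · subst hv
          rw [PySem.Dict.get?_insert_self, List.find?_append, hfind]
          simp
        · rw [PySem.Dict.get?_insert_of_ne d _ hv, hrep v, List.find?_append]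
          have : [t].find? (fun u => u.2.2 == v) = none := by
            simp [List.find?, beq_eq_false_iff_ne.mpr (Ne.symm hv)]
          rw [this, Option.or_none]
      rw [List.foldl_cons, hstep, ih (pre ++ [t]) acc _ hrep']
      simp [pvGo, pvEmit, hfind]
    | some u =>
      rw [hfind] at hd
      have hrep' : ∀ v : Int, d.get? v
          = ((pre ++ [t]).find? (fun u => u.2.2 == v)).map (fun u => (u.1, u.2.1)) := by
        intro v
        by_cases hv : v = t.2.2
        · subst hv
          rw [List.find?_append, hfind, hrep, hfind]
          rfl
        · rw [hrep v, List.find?_append]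
          have : [t].find? (fun u => u.2.2 == v) = none := by
            simp [List.find?, beq_eq_false_iff_ne.mpr (Ne.symm hv)]
          rw [this, Option.or_none]
      have hemit : pvGo pre (t :: r)
          = pvEmit pre t ++ pvGo (pre ++ [t]) r := rfl
      by_cases hcond : PySem.Int.mod t.1 2 = PySem.Int.mod u.1 2 ∧ |t.2.1 - u.2.1| = 0
      · have hstep : pvStepA (acc, d) t = (acc ++ [[t.1, t.2.1, t.2.2]], d) := by
          simp only [pvStepA, hd, Option.map_some]
          rw [if_pos hcond]
        have hem : pvEmit pre t = [[t.1, t.2.1, t.2.2]] := by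
          simp only [pvEmit, hfind]
          rw [if_pos hcond]
        rw [List.foldl_cons, hstep, ih (pre ++ [t]) _ _ hrep', hemit, hem]
        simp
      · have hstep : pvStepA (acc, d) t = (acc, d) := by
          simp only [pvStepA, hd, Option.map_some]
          rw [if_neg hcond]
        have hem : pvEmit pre t = [] := by
          simp only [pvEmit, hfind]
          rw [if_neg hcond]
        rw [List.foldl_cons, hstep, ih (pre ++ [t]) _ _ hrep', hemit, hem]
        simp

lemma pvA_eq_fold (vector : List (List (Int × Int))) :
    check_parity_v3 vector = ((pvFlat vector).foldl pvStepA ([], PySem.Dict.empty)).1 := by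
  unfold check_parity_v3 pvFlat
  rw [List.foldl_flatMap]
  have hfun : (fun (st : List (List Int) × PySem.Dict Int (Int × Int)) (ig : Int × List (Int × Int)) =>
      (PySem.List.enumerate ig.2).foldl (fun st jp =>
        if jp.2.2 ≠ 0 then
          match st.2.get? jp.2.2 with
          | none => (st.1, st.2.insert jp.2.2 (ig.1, jp.1))
          | some fp =>
            if PySem.Int.mod ig.1 2 = PySem.Int.mod fp.1 2 ∧ |jp.1 - fp.2| = 0 then
              (st.1 ++ [[ig.1, jp.1, jp.2.2]], st.2)
            else st
        else st) st)
      = (fun acc ig => List.foldl pvStepA acc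
          (List.filterMap (fun jp => if jp.2.2 ≠ 0 then some (ig.1, jp.1, jp.2.2) else none)
            (PySem.List.enumerate ig.2))) := by
    funext st ig
    rw [List.foldl_filterMap]
    congr 1
    funext st' jp
    by_cases h : jp.2.2 = 0 <;> simp [h, pvStepA]
  rw [hfun]

-- A = filterMap over flat with the whole-list predicate pvQ
lemma pvGo_eq_filterMap (flat : List (Int × Int × Int)) (hp : flat.Pairwise pvPosLt) :
    ∀ (l pre : List (Int × Int × Int)), flat = pre ++ l →
    pvGo pre l = l.filterMap (fun t => if pvQ flat t then some [t.1, t.2.1, t.2.2] else none) := by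
  intro l
  induction l with
  | nil => intro pre _; simp [pvGo]
  | cons t r ih =>
    intro pre hflat
    have hft : flat.find? (fun u => u.2.2 == t.2.2)
        = (pre.find? (fun u => u.2.2 == t.2.2)).or (some t) := by
      rw [hflat, List.find?_append]
      congr 1
      simp [List.find?]
    have hgo : pvGo pre (t :: r) = pvEmit pre t ++ pvGo (pre ++ [t]) r := rfl
    have hrec := ih (pre ++ [t]) (by rw [hflat, List.append_assoc]; rfl)
    rw [hgo, hrec, List.filterMap_cons]
    cases hfind : pre.find? (fun u => u.2.2 == t.2.2) with
    | none =>
      have hsome : flat.find? (fun u => u.2.2 == t.2.2) = some t := by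
        rw [hft, hfind]; rfl
      have hq : pvQ flat t = false := by
        simp [pvQ, hsome]
      rw [hq]
      simp [pvEmit, hfind]
    | some u =>
      have hsome : flat.find? (fun u => u.2.2 == t.2.2) = some u := by
        rw [hft, hfind]; rfl
      have hu : u ∈ pre := List.mem_of_find?_eq_some hfind
      have hne : pvPosLt u t := by
        have hp' := hp
        rw [hflat] at hp'
        rcases List.pairwise_append.mp hp' with ⟨_, _, hcross⟩
        exact hcross u hu t (by simp)
      have hcondiff : ((u.1, u.2.1) ≠ (t.1, t.2.1) ∧ PySem.Int.mod u.1 2 = PySem.Int.mod t.1 2 ∧ u.2.1 = t.2.1)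
          ↔ (PySem.Int.mod t.1 2 = PySem.Int.mod u.1 2 ∧ |t.2.1 - u.2.1| = 0) := by
        constructor
        · rintro ⟨_, h2, h3⟩
          exact ⟨h2.symm, by rw [abs_eq_zero]; omega⟩
        · rintro ⟨h2, h3⟩
          rw [abs_eq_zero] at h3
          refine ⟨?_, h2.symm, by omega⟩
          rcases hne with h | h
          · simp [Prod.ext_iff]; omega
          · simp [Prod.ext_iff]; omega
      by_cases hc : PySem.Int.mod t.1 2 = PySem.Int.mod u.1 2 ∧ |t.2.1 - u.2.1| = 0
      · have hq : pvQ flat t = true := by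
          simp only [pvQ, hsome, decide_eq_true_eq]
          exact hcondiff.mpr hc
        rw [hq]
        simp only [pvEmit, hfind, if_pos hc, if_true]
        simp
      · have hq : pvQ flat t = false := by
          simp only [pvQ, hsome]
          simp only [decide_eq_false_iff_not]
          exact fun h => hc (hcondiff.mp h)
        rw [hq]
        simp only [pvEmit, hfind, if_neg hc]
        simp

-- B's fold is pvLoop
lemma pvFoldB_loop (s : List (Int × Int × Int)) :
    ∀ (acc : List (Int × Int × Int)) (a : Option (Int × Int × Int)),
    (s.foldl (fun st t =>
      match st.2 with
      | none => (st.1, some t)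
      | some a =>
        if a.1 ≠ t.1 then (st.1, some t)
        else if PySem.Int.mod t.2.1 2 = PySem.Int.mod a.2.1 2 ∧ t.2.2 = a.2.2 then
          (st.1 ++ [(t.2.1, t.2.2, t.1)], st.2)
        else st) (acc, a)).1 = acc ++ pvLoop a s := by
  induction s with
  | nil => intro acc a; simp [pvLoop]
  | cons t r ih =>
    intro acc a
    rw [List.foldl_cons]
    cases a with
    | none => rw [ih]; rfl
    | some a₀ =>
      by_cases h1 : a₀.1 ≠ t.1
      · simp only [if_pos h1]
        rw [ih]
        simp [pvLoop, h1]
      · by_cases h2 : PySem.Int.mod t.2.1 2 = PySem.Int.mod a₀.2.1 2 ∧ t.2.2 = a₀.2.2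
        · simp only [if_neg h1, if_pos h2]
          rw [ih]
          simp only [pvLoop]
          rw [if_neg h1, if_pos h2]
          simp
        · simp only [if_neg h1, if_neg h2]
          rw [ih]
          simp only [pvLoop]
          rw [if_neg h1, if_neg h2]

-- the run-scan over a value-monotone list of distinct triples emits per element
-- exactly what the whole-list first occurrence dictates
-- over a constant-value run the anchor never changes and each element is compared to it
lemma pvLoop_block (a₀ : Int × Int × Int) :
    ∀ (B rest : List (Int × Int × Int)), (∀ t ∈ B, t.1 = a₀.1) →
    pvLoop (some a₀) (B ++ rest)
      = B.filterMap (fun t =>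
          if PySem.Int.mod t.2.1 2 = PySem.Int.mod a₀.2.1 2 ∧ t.2.2 = a₀.2.2 then
            some (t.2.1, t.2.2, t.1)
          else none) ++ pvLoop (some a₀) rest := by
  intro B
  induction B with
  | nil => intro rest _; simp
  | cons t B' ih =>
    intro rest hB
    have ht : t.1 = a₀.1 := hB t (by simp)
    have h1 : ¬ a₀.1 ≠ t.1 := by omega
    rw [List.cons_append]
    simp only [pvLoop]
    rw [if_neg h1]
    by_cases h2 : PySem.Int.mod t.2.1 2 = PySem.Int.mod a₀.2.1 2 ∧ t.2.2 = a₀.2.2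
    · rw [if_pos h2, ih rest (fun u hu => hB u (by simp [hu])), List.filterMap_cons]
      rw [if_pos h2]
      rfl
    · rw [if_neg h2, ih rest (fun u hu => hB u (by simp [hu])), List.filterMap_cons]
      rw [if_neg h2]

-- a stale anchor whose value does not match the head is the same as no anchor
lemma pvLoop_reset (a₀ : Int × Int × Int) (s : List (Int × Int × Int))
    (h : ∀ h', s.head? = some h' → a₀.1 ≠ h'.1) :
    pvLoop (some a₀) s = pvLoop none s := by
  cases s with
  | nil => rfl
  | cons t r =>
    have := h t rfl
    simp only [pvLoop]
    rw [if_pos this]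

-- a find? result is below every other matching element of a pairwise list
lemma pvFind?_min {α : Type} {q : α → α → Prop} {l : List α} (hp : l.Pairwise q)
    {p : α → Bool} {m : α} (h : l.find? p = some m) :
    ∀ u ∈ l, p u → u = m ∨ q m u := by
  induction l with
  | nil => cases h
  | cons a r ih =>
    rcases List.pairwise_cons.mp hp with ⟨ha, hr⟩
    by_cases hpa : p a
    · rw [List.find?_cons_of_pos hpa] at h
      cases h
      intro u hu _
      rcases List.mem_cons.mp hu with rfl | hu
      · exact Or.inl rfl
      · exact Or.inr (ha u hu)
    · rw [List.find?_cons_of_neg (by simpa using hpa)] at h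
      intro u hu hpu
      rcases List.mem_cons.mp hu with rfl | hu
      · exact absurd hpu hpa
      · exact ih hr h u hu hpu

lemma pvLoop_spec (n : Nat) : ∀ (s : List (Int × Int × Int)), s.length ≤ n →
    s.Pairwise (fun a b => a ≠ b ∧ a.1 ≤ b.1) →
    pvLoop none s = s.filterMap (pvG s) := by
  induction n with
  | zero =>
    intro s hlen _
    have : s = [] := List.eq_nil_of_length_eq_zero (by omega)
    subst this; rfl
  | succ n ih =>
    intro s hlen hp
    cases s with
    | nil => rfl
    | cons a₀ r =>
      rcases List.pairwise_cons.mp hp with ⟨h₁, hpr⟩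
      obtain ⟨B, hBdef⟩ : ∃ B, B = r.takeWhile (fun u => u.1 == a₀.1) := ⟨_, rfl⟩
      obtain ⟨r', hr'def⟩ : ∃ r', r' = r.dropWhile (fun u => u.1 == a₀.1) := ⟨_, rfl⟩
      have hBr : B ++ r' = r := by
        rw [hBdef, hr'def]; exact List.takeWhile_append_dropWhile
      have hB : ∀ t ∈ B, t.1 = a₀.1 := fun t ht => by
        rw [hBdef] at ht
        have := List.mem_takeWhile_imp ht
        simpa using this
      have hr'sub : r'.Sublist r := by rw [hr'def]; exact List.dropWhile_sublist _
      have hr'pair : r'.Pairwise (fun a b => a ≠ b ∧ a.1 ≤ b.1) :=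
        List.Pairwise.sublist hr'sub hpr
      have hr'lt : ∀ t ∈ r', a₀.1 < t.1 := by
        cases hr'c : r' with
        | nil => intro t ht; simp at ht
        | cons h' rest' =>
          have hh'ne : (h'.1 == a₀.1) = false := by
            have := List.head?_dropWhile_not (fun u => u.1 == a₀.1) r
            rw [← hr'def, hr'c] at this
            exact this
          have hh'mem : h' ∈ r := hr'sub.mem (by rw [hr'c]; simp)
          have hh'lt : a₀.1 < h'.1 := by
            have := (h₁ h' hh'mem).2
            have hne : h'.1 ≠ a₀.1 := by simpa using hh'ne
            omega
          intro t ht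
          rcases List.mem_cons.mp ht with rfl | ht
          · exact hh'lt
          · have hpr2 := hr'pair
            rw [hr'c] at hpr2
            have := (List.pairwise_cons.mp hpr2).1 t ht
            omega
      have hr'len : r'.length ≤ n := by
        have := hr'sub.length_le
        simp at hlen
        omega
      have hL3 : pvLoop (some a₀) r' = pvLoop none r' := by
        apply pvLoop_reset
        intro h' hh'
        have hm : h' ∈ r' := List.mem_of_mem_head? (by simp [hh'])
        have := hr'lt h' hm
        omega
      subst hBr
      -- RHS facts
      have hfind_self : (a₀ :: (B ++ r')).find? (fun u => u.1 == a₀.1) = some a₀ := by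
        simp [List.find?]
      have hG_head : pvG (a₀ :: (B ++ r')) a₀ = none := by
        simp only [pvG, hfind_self]
        rw [if_neg (by simp)]
      have hG_B : ∀ t ∈ B, pvG (a₀ :: (B ++ r')) t
          = (if PySem.Int.mod t.2.1 2 = PySem.Int.mod a₀.2.1 2 ∧ t.2.2 = a₀.2.2 then
              some (t.2.1, t.2.2, t.1)
            else none) := by
        intro t ht
        have htv : t.1 = a₀.1 := hB t ht
        have htr : t ∈ B ++ r' := List.mem_append_left _ ht
        have hne : a₀ ≠ t := (h₁ t htr).1
        have hfind : (a₀ :: (B ++ r')).find? (fun u => u.1 == t.1) = some a₀ := by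
          rw [htv]; exact hfind_self
        simp only [pvG, hfind]
        by_cases hc : PySem.Int.mod t.2.1 2 = PySem.Int.mod a₀.2.1 2 ∧ t.2.2 = a₀.2.2
        · rw [if_pos ⟨hne, hc⟩, if_pos hc]
        · rw [if_neg (fun h => hc h.2), if_neg hc]
      have hG_r' : ∀ t ∈ r', pvG (a₀ :: (B ++ r')) t = pvG r' t := by
        intro t ht
        have htv : a₀.1 < t.1 := hr'lt t ht
        have hskip : (a₀ :: B).find? (fun u => u.1 == t.1) = none := by
          rw [List.find?_eq_none]
          intro u hu
          rcases List.mem_cons.mp hu with rfl | hu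
          · simp; omega
          · have := hB u hu
            simp; omega
        have hthis : (a₀ :: (B ++ r')).find? (fun u => u.1 == t.1) = r'.find? (fun u => u.1 == t.1) := by
          rw [← List.cons_append, List.find?_append, hskip, Option.none_or]
        simp only [pvG, hthis]
      calc pvLoop none (a₀ :: (B ++ r'))
          = pvLoop (some a₀) (B ++ r') := rfl
        _ = B.filterMap (fun t =>
              if PySem.Int.mod t.2.1 2 = PySem.Int.mod a₀.2.1 2 ∧ t.2.2 = a₀.2.2 then
                some (t.2.1, t.2.2, t.1)
              else none) ++ pvLoop (some a₀) r' := pvLoop_block a₀ B r' hB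
        _ = B.filterMap (fun t =>
              if PySem.Int.mod t.2.1 2 = PySem.Int.mod a₀.2.1 2 ∧ t.2.2 = a₀.2.2 then
                some (t.2.1, t.2.2, t.1)
              else none) ++ r'.filterMap (pvG r') := by
            rw [hL3, ih r' hr'len hr'pair]
        _ = (a₀ :: (B ++ r')).filterMap (pvG (a₀ :: (B ++ r'))) := by
            rw [List.filterMap_cons_none hG_head, List.filterMap_append,
              List.filterMap_congr hG_B, List.filterMap_congr hG_r']

lemma pvKey3_le_fst {a b : Int × Int × Int} (h : pvKey3 a ≤ pvKey3 b) : a.1 ≤ b.1 := by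
  rcases Prod.Lex.toLex_le_toLex.mp h with h' | h'
  · omega
  · omega

lemma pvKey3_lt_of_posLt {a b : Int × Int × Int} (h : pvPosLt a b) : pvKey3 a < pvKey3 b := by
  apply Prod.Lex.toLex_lt_toLex.mpr
  rcases h with h' | h'
  · exact Or.inl h'
  · exact Or.inr ⟨h'.1, Prod.Lex.toLex_lt_toLex.mpr (Or.inl h'.2)⟩

lemma pvKey3_lt_of_posLt_sw {a b : Int × Int × Int} (hv : a.2.2 = b.2.2) (h : pvPosLt a b) :
    pvKey3 (pvSw a) < pvKey3 (pvSw b) := by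
  apply Prod.Lex.toLex_lt_toLex.mpr
  refine Or.inr ⟨hv, Prod.Lex.toLex_lt_toLex.mpr ?_⟩
  rcases h with h' | h'
  · exact Or.inl h'
  · exact Or.inr ⟨h'.1, h'.2⟩

lemma pvSw_inj : Function.Injective pvSw := by
  intro a b h
  simp only [pvSw, Prod.mk.injEq] at h
  exact Prod.ext h.2.1 (Prod.ext h.2.2 h.1)

-- B's phase-1 list is the A-side flat list with the triple components rotated
lemma pvFlatB (vector : List (List (Int × Int))) :
    ((PySem.List.enumerate vector).flatMap (fun ig =>
      (PySem.List.enumerate ig.2).filterMap (fun jp =>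
        if jp.2.2 ≠ 0 then some (jp.2.2, ig.1, jp.1) else none)))
      = (pvFlat vector).map pvSw := by
  unfold pvFlat
  rw [List.map_flatMap]
  congr 1
  funext ig
  rw [List.map_filterMap]
  congr 1
  funext jp
  by_cases h : jp.2.2 = 0 <;> simp [h, pvSw]

lemma pvFilterMap_if {α β : Type} (p : α → Bool) (f : α → β) (l : List α) :
    l.filterMap (fun t => if p t then some (f t) else none) = (l.filter p).map f := by
  induction l with
  | nil => rfl
  | cons a r ih =>
    by_cases h : p a <;> simp [h, ih]

-- distinct triples of the flat list differ in their (i, j) position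
lemma pvPosNe_of_mem {F : List (Int × Int × Int)} (hp : F.Pairwise pvPosLt)
    {f t : Int × Int × Int} (hf : f ∈ F) (ht : t ∈ F) (hne : f ≠ t) :
    (f.1, f.2.1) ≠ (t.1, t.2.1) := by
  have hsym : Symmetric (fun a b : Int × Int × Int => (a.1, a.2.1) ≠ (b.1, b.2.1)) := by
    intro a b h
    exact fun h' => h (by simp [Prod.ext_iff] at h' ⊢; omega)
  have hp' : F.Pairwise (fun a b : Int × Int × Int => (a.1, a.2.1) ≠ (b.1, b.2.1)) := by
    refine hp.imp ?_
    intro a b h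
    rcases h with h | h <;> (simp [Prod.ext_iff]; omega)
  exact hp'.forall hsym hf ht hne

-- ===== VERDICT (by name: the statement is the Claim_ definition above) =====
theorem check_parity_v3_spec : Claim_equal_check_parity_v3 := by
  intro vector _
  unfold Spec_check_parity_v3
  have hpF := pvFlat_pairwise vector
  have hFnd : (pvFlat vector).Nodup := by
    refine hpF.imp ?_
    intro a b h
    rintro rfl
    rcases h with h | h <;> omega
  -- A's value: filterMap over the flat list with the whole-list predicate
  have hA : check_parity_v3 vector
      = (pvFlat vector).filterMap
          (fun t => if pvQ (pvFlat vector) t then some [t.1, t.2.1, t.2.2] else none) := by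
    rw [pvA_eq_fold, pvFoldA (pvFlat vector) [] [] PySem.Dict.empty
        (by intro v; simp [PySem.Dict.get?_empty])]
    rw [pvGo_eq_filterMap (pvFlat vector) hpF (pvFlat vector) [] (by simp)]
    rfl
  -- B's sorted flat list and its order facts
  have hsperm : (PySem.List.sorted ((pvFlat vector).map pvSw) pvKey3).Perm
      ((pvFlat vector).map pvSw) := PySem.List.sorted_perm _ _ false
  have hsnodup : (PySem.List.sorted ((pvFlat vector).map pvSw) pvKey3).Nodup :=
    hsperm.symm.nodup (hFnd.map pvSw_inj)
  have hs : (PySem.List.sorted ((pvFlat vector).map pvSw) pvKey3).Pairwise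
      (fun a b => a ≠ b ∧ pvKey3 a ≤ pvKey3 b) :=
    List.Pairwise.and hsnodup (PySem.List.sorted_pairwise _ _)
  have hs' : (PySem.List.sorted ((pvFlat vector).map pvSw) pvKey3).Pairwise
      (fun a b => a ≠ b ∧ a.1 ≤ b.1) :=
    hs.imp (fun h => ⟨h.1, pvKey3_le_fst h.2⟩)
  -- per-triple: B's anchor lookup against the sorted list agrees with pvQ
  have hGsw : ∀ t ∈ pvFlat vector,
      pvG (PySem.List.sorted ((pvFlat vector).map pvSw) pvKey3) (pvSw t)
        = if pvQ (pvFlat vector) t then some t else none := by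
    intro t ht
    have hswt : pvSw t ∈ PySem.List.sorted ((pvFlat vector).map pvSw) pvKey3 :=
      (PySem.List.mem_sorted _ _ _ _).mpr (List.mem_map_of_mem ht)
    obtain ⟨f', hf'⟩ : ∃ f', (PySem.List.sorted ((pvFlat vector).map pvSw) pvKey3).find?
        (fun u => u.1 == t.2.2) = some f' := by
      have : ((PySem.List.sorted ((pvFlat vector).map pvSw) pvKey3).find?
          (fun u => u.1 == t.2.2)).isSome :=
        List.find?_isSome.mpr ⟨pvSw t, hswt, by simp [pvSw]⟩
      exact Option.isSome_iff_exists.mp this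
    obtain ⟨f, hf⟩ : ∃ f, (pvFlat vector).find? (fun u => u.2.2 == t.2.2) = some f := by
      have : ((pvFlat vector).find? (fun u => u.2.2 == t.2.2)).isSome :=
        List.find?_isSome.mpr ⟨t, ht, by simp⟩
      exact Option.isSome_iff_exists.mp this
    have hf'v : f'.1 = t.2.2 := by simpa using List.find?_some hf'
    have hfv : f.2.2 = t.2.2 := by simpa using List.find?_some hf
    have hf'mem : f' ∈ PySem.List.sorted ((pvFlat vector).map pvSw) pvKey3 :=
      List.mem_of_find?_eq_some hf'
    have hfmem : f ∈ pvFlat vector := List.mem_of_find?_eq_some hf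
    -- the two first occurrences are the same triple
    have hswf : pvSw f = f' := by
      have hswf_mem : pvSw f ∈ PySem.List.sorted ((pvFlat vector).map pvSw) pvKey3 :=
        (PySem.List.mem_sorted _ _ _ _).mpr (List.mem_map_of_mem hfmem)
      have h1 := pvFind?_min hs hf' (pvSw f) hswf_mem (by simp [pvSw, hfv])
      rcases h1 with h1 | h1
      · exact h1
      obtain ⟨u₀, hu₀mem, hu₀⟩ : ∃ u₀, u₀ ∈ pvFlat vector ∧ pvSw u₀ = f' := by
        have : f' ∈ (pvFlat vector).map pvSw := hsperm.subset hf'mem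
        rcases List.mem_map.mp this with ⟨u₀, h₁, h₂⟩
        exact ⟨u₀, h₁, h₂⟩
      have hu₀v : u₀.2.2 = t.2.2 := by
        have : (pvSw u₀).1 = f'.1 := by rw [hu₀]
        simpa [pvSw, hf'v] using this
      have h2 := pvFind?_min hpF hf u₀ hu₀mem (by simp [hu₀v])
      have hu₀ne : u₀ ≠ f := by
        intro hh
        exact h1.1 (by rw [← hu₀, hh])
      rcases h2 with h2 | h2
      · exact absurd h2 hu₀ne
      · have hlt : pvKey3 (pvSw f) < pvKey3 (pvSw u₀) :=
          pvKey3_lt_of_posLt_sw (by omega) h2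
        rw [hu₀] at hlt
        exact absurd (lt_of_le_of_lt h1.2 hlt) (lt_irrefl _)
    -- evaluate pvG at pvSw t
    have hcondiff : (f' ≠ pvSw t ∧ PySem.Int.mod (pvSw t).2.1 2 = PySem.Int.mod f'.2.1 2
          ∧ (pvSw t).2.2 = f'.2.2)
        ↔ ((f.1, f.2.1) ≠ (t.1, t.2.1) ∧ PySem.Int.mod f.1 2 = PySem.Int.mod t.1 2
          ∧ f.2.1 = t.2.1) := by
      rw [← hswf]
      constructor
      · rintro ⟨h1, h2, h3⟩
        refine ⟨pvPosNe_of_mem hpF hfmem ht (fun hh => h1 (by rw [hh])), ?_, ?_⟩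
        · simpa [pvSw] using h2.symm
        · simpa [pvSw] using h3.symm
      · rintro ⟨h1, h2, h3⟩
        refine ⟨fun hh => h1 (by rw [pvSw_inj hh]), ?_, ?_⟩
        · simpa [pvSw] using h2.symm
        · simpa [pvSw] using h3.symm
    have hfind_t : (PySem.List.sorted ((pvFlat vector).map pvSw) pvKey3).find?
        (fun u => u.1 == (pvSw t).1) = some f' := by
      simpa [pvSw] using hf'
    have hGdef : pvG (PySem.List.sorted ((pvFlat vector).map pvSw) pvKey3) (pvSw t)
        = if f' ≠ pvSw t ∧ PySem.Int.mod (pvSw t).2.1 2 = PySem.Int.mod f'.2.1 2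
            ∧ (pvSw t).2.2 = f'.2.2 then
            some ((pvSw t).2.1, (pvSw t).2.2, (pvSw t).1)
          else none := by
      simp only [pvG, hfind_t]
    have hQdef : pvQ (pvFlat vector) t
        = decide ((f.1, f.2.1) ≠ (t.1, t.2.1) ∧ PySem.Int.mod f.1 2 = PySem.Int.mod t.1 2
            ∧ f.2.1 = t.2.1) := by
      simp only [pvQ, hf]
    rw [hGdef, hQdef]
    by_cases hc : (f.1, f.2.1) ≠ (t.1, t.2.1) ∧ PySem.Int.mod f.1 2 = PySem.Int.mod t.1 2
        ∧ f.2.1 = t.2.1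
    · rw [if_pos (hcondiff.mpr hc), if_pos (decide_eq_true hc)]
      simp [pvSw]
    · rw [if_neg (fun h => hc (hcondiff.mp h)),
        if_neg (fun h => hc (of_decide_eq_true h))]
  -- B's value
  have hBalt : check_parity_v3_alt vector
      = (PySem.List.sorted
          (pvLoop none (PySem.List.sorted ((pvFlat vector).map pvSw) pvKey3)) pvKey3).map
          (fun t => [t.1, t.2.1, t.2.2]) := by
    simp only [check_parity_v3_alt]
    rw [pvFlatB vector, pvFoldB_loop]
    rfl
  -- the emitted multiset is the filter of the flat list, re-sorted into flat order
  have hbadperm : (pvLoop none (PySem.List.sorted ((pvFlat vector).map pvSw) pvKey3)).Perm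
      ((pvFlat vector).filter (pvQ (pvFlat vector))) := by
    rw [pvLoop_spec (PySem.List.sorted ((pvFlat vector).map pvSw) pvKey3).length _ le_rfl hs']
    have h1 : ((PySem.List.sorted ((pvFlat vector).map pvSw) pvKey3).filterMap
            (pvG (PySem.List.sorted ((pvFlat vector).map pvSw) pvKey3))).Perm
        (((pvFlat vector).map pvSw).filterMap
            (pvG (PySem.List.sorted ((pvFlat vector).map pvSw) pvKey3))) :=
      hsperm.filterMap _
    have h2 : (((pvFlat vector).map pvSw).filterMap
            (pvG (PySem.List.sorted ((pvFlat vector).map pvSw) pvKey3)))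
        = (pvFlat vector).filter (pvQ (pvFlat vector)) := by
      rw [List.filterMap_map]
      have hcg : ∀ x ∈ pvFlat vector,
          ((pvG (PySem.List.sorted ((pvFlat vector).map pvSw) pvKey3)) ∘ pvSw) x
            = (fun t => if pvQ (pvFlat vector) t then some t else none) x :=
        fun t ht => hGsw t ht
      rw [List.filterMap_congr hcg]
      have := pvFilterMap_if (pvQ (pvFlat vector)) (fun t => t) (pvFlat vector)
      rw [this, List.map_id']
    exact h2 ▸ h1
  have hRpair : ((pvFlat vector).filter (pvQ (pvFlat vector))).Pairwise
      (fun a b => pvKey3 a < pvKey3 b) :=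
    (List.Pairwise.sublist List.filter_sublist hpF).imp pvKey3_lt_of_posLt
  have hsortbad : PySem.List.sorted
      (pvLoop none (PySem.List.sorted ((pvFlat vector).map pvSw) pvKey3)) pvKey3
      = (pvFlat vector).filter (pvQ (pvFlat vector)) :=
    PySem.List.sorted_eq_of_perm_of_pairwise_lt _ _ _ hbadperm.symm hRpair
  rw [hA, hBalt, hsortbad, pvFilterMap_if (pvQ (pvFlat vector)) (fun t => [t.1, t.2.1, t.2.2])]
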